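-- pv_equiv track=rewrite | github.com/kh277/BOJ | 백준/Gold/10658. Learning by Example/Learning by Example.py | solve
-- ===== SOURCE A (Python) =====
-- def solve(N, A, B, data):
--     data.sort()
--     result = 0
--
--     for i in range(1, N):
--         prevX, prevDot = data[i-1]
--         curX, curDot = data[i]
--         gap = curX - prevX
--         if gap & 1 == 0:
--             mid = (curX + prevX) >> 1
--             if A <= mid <= B and (prevDot | curDot):
--                 result += 1
--
--     for i in range(N):
--         left = A
--         right = B
--
--         # 왼쪽 경계 처리
--         if i > 0:
--             midL = (data[i-1][0] + data[i][0]) >> 1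
--             left = max(left, midL + 1)
--
--         # 오른쪽 경계 처리
--         if i < N-1:
--             gap = data[i+1][0] - data[i][0]
--             midR = (data[i][0] + data[i+1][0]) >> 1
--             if gap & 1 == 0:
--                 right = min(right, midR - 1)
--             else:
--                 right = min(right, midR)
--
--         if data[i][1] == 1 and left <= right:
--             result += (right - left + 1)
--
--     return result
-- ===== SOURCE B (Python) =====
-- def solve(N, A, B, data):
--     # Single streaming sweep over the gaps of the sorted prefix, carrying the
--     # previous point's pending interval; A does two indexed passes instead.
--     # (Like A, this sorts `data` in place.)
--     data.sort()
--     pts = data[:N] if N > 0 else []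
--     total = 0
--     prev = None  # (x, dot, left bound of.the owned interval)
--     for x, d in pts:
--         if prev is None:
--             prev = (x, d, A)
--             continue
--         px, pd, pleft = prev
--         mid = (px + x) >> 1
--         if (x - px) % 2 == 0:
--             if A <= mid <= B and (pd | d):
--                 total += 1
--             pright = min(B, mid - 1)
--         else:
--             pright = min(B, mid)
--         if pd == 1 and pleft <= pright:
--             total += pright - pleft + 1
--         prev = (x, d, max(A, mid + 1))
--     if prev is not None:
--         px, pd, pleft = prev
--         if pd == 1 and pleft <= B:
--             total += B - pleft + 1
--     return total
-- ===== Notes on version B (the rewrite author's own statement) =====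
-- stated objective: alternative
-- what changed: A makes two indexed passes over the sorted points (one counting even-gap midpoint ties, one re-deriving both neighbour boundaries per point); B makes a single streaming sweep over adjacent gaps of the sorted prefix, carrying the previous point's pending interval and finalizing it as each gap is crossed.
import Mathlib
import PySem

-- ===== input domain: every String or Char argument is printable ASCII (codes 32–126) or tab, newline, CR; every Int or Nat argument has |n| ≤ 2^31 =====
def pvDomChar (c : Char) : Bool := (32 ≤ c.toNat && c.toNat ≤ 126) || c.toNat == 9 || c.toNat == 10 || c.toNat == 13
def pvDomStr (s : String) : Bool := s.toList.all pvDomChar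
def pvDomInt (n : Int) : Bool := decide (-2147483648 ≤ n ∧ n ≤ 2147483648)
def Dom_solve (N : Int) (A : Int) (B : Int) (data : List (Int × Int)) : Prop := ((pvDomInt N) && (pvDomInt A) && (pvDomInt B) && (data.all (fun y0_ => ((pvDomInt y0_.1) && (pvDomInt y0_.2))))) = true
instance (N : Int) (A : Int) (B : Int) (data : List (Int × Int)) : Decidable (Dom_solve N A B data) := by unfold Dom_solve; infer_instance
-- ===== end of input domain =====

-- B replaces A's two indexed passes (midpoint-tie count, then per-point interval with both
-- neighbours re-derived) by ONE streaming sweep over the gaps of the sorted prefix that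
-- carries the previous point's pending interval; equivalence is about the RETURN value
-- (both A and B sort `data` in place).

-- ===== PORT A =====
-- literal port: data.sort() = sorted2 (tuple order), x >> 1 = x >>> 1, gap & 1 = band,
-- truthiness of (prevDot | curDot) = bor ≠ 0; pyGetD is safe under Pre_ (indices < len).
def solve (N : Int) (A : Int) (B : Int) (data : List (Int × Int)) : Int :=
  let s := PySem.List.sorted2 data (fun p => p.1) (fun p => p.2)
  let result : Int := (PySem.List.pyRange 1 N).foldl (fun result i =>
    let prev := PySem.List.pyGetD s (i - 1) (0, 0)
    let cur := PySem.List.pyGetD s i (0, 0)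
    let gap := cur.1 - prev.1
    if PySem.Int.band gap 1 = 0 then
      let mid := (cur.1 + prev.1) >>> (1 : Nat)
      if A ≤ mid ∧ mid ≤ B ∧ PySem.Int.bor prev.2 cur.2 ≠ 0 then result + 1 else result
    else result) 0
  (PySem.List.pyRange 0 N).foldl (fun result i =>
    let left := A
    let right := B
    let left := if i > 0 then
        max left ((((PySem.List.pyGetD s (i - 1) (0, 0)).1 + (PySem.List.pyGetD s i (0, 0)).1) >>> (1 : Nat)) + 1)
      else left
    let right := if i < N - 1 then
        let gap := (PySem.List.pyGetD s (i + 1) (0, 0)).1 - (PySem.List.pyGetD s i (0, 0)).1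
        let midR := ((PySem.List.pyGetD s i (0, 0)).1 + (PySem.List.pyGetD s (i + 1) (0, 0)).1) >>> (1 : Nat)
        if PySem.Int.band gap 1 = 0 then min right (midR - 1) else min right midR
      else right
    if (PySem.List.pyGetD s i (0, 0)).2 = 1 ∧ left ≤ right then result + (right - left + 1) else result) result

-- ===== PORT B =====
-- the for-loop of Source B with `prev = (px, pd, pleft)` already set; [] = the final flush.
def solveAltGo (A : Int) (B : Int) (total : Int) (px : Int) (pd : Int) (pleft : Int) :
    List (Int × Int) → Int
  | [] => if pd = 1 ∧ pleft ≤ B then total + (B - pleft + 1) else total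
  | (x, d) :: rest =>
    let mid := (px + x) >>> (1 : Nat)
    let tp : Int × Int :=
      if PySem.Int.mod (x - px) 2 = 0 then
        ((if A ≤ mid ∧ mid ≤ B ∧ PySem.Int.bor pd d ≠ 0 then total + 1 else total), min B (mid - 1))
      else (total, min B mid)
    let total2 := if pd = 1 ∧ pleft ≤ tp.2 then tp.1 + (tp.2 - pleft + 1) else tp.1
    solveAltGo A B total2 x d (max A (mid + 1)) rest

def solve_alt (N : Int) (A : Int) (B : Int) (data : List (Int × Int)) : Int :=
  let s := PySem.List.sorted2 data (fun p => p.1) (fun p => p.2)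
  let pts := if 0 < N then PySem.List.slice s none (some N) else []
  match pts with
  | [] => 0
  | (x, d) :: rest => solveAltGo A B 0 x d A rest

-- ===== PRECONDITION & SPEC =====
-- Pre_ excludes exactly the inputs on which A raises IndexError: both loops index data[i]
-- for i up to N-1, so A returns normally iff N ≤ len(data).
def Pre_solve (N : Int) (A : Int) (B : Int) (data : List (Int × Int)) : Prop :=
  N ≤ (data.length : Int)
instance (N : Int) (A : Int) (B : Int) (data : List (Int × Int)) : Decidable (Pre_solve N A B data) := by unfold Pre_solve; infer_instance

def pvWitness_solve : Int × Int × Int × (List (Int × Int)) := (2, 0, 5, [(4, 0), (1, 1)])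

def Spec_solve (N : Int) (A : Int) (B : Int) (data : List (Int × Int)) (out : Int) : Prop := out = solve_alt N A B data
instance (N : Int) (A : Int) (B : Int) (data : List (Int × Int)) (out : Int) : Decidable (Spec_solve N A B data out) := by unfold Spec_solve; infer_instance

-- ===== CLAIM (what is proved, stated in full; the proofs are below) =====
def Claim_equal_solve : Prop := ∀ (N : Int) (A : Int) (B : Int) (data : List (Int × Int)), Dom_solve N A B data → Pre_solve N A B data → Spec_solve N A B data (solve N A B data)

-- ===== LEMMAS AND PROOFS =====

-- the tie contribution of an adjacent pair (A's first loop body at one index)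
def tieT (A : Int) (B : Int) (p : Int × Int) (q : Int × Int) : Int :=
  if PySem.Int.mod (q.1 - p.1) 2 = 0 ∧ A ≤ (p.1 + q.1) >>> (1 : Nat) ∧ (p.1 + q.1) >>> (1 : Nat) ≤ B ∧ PySem.Int.bor p.2 q.2 ≠ 0 then 1 else 0

-- the right bound a point gets from its right neighbour
def rightR (B : Int) (p : Int × Int) (q : Int × Int) : Int :=
  if PySem.Int.mod (q.1 - p.1) 2 = 0 then min B (((p.1 + q.1) >>> (1 : Nat)) - 1) else min B ((p.1 + q.1) >>> (1 : Nat))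

-- a point's interval contribution
def contrib (p : Int × Int) (L : Int) (R : Int) : Int :=
  if p.2 = 1 ∧ L ≤ R then R - L + 1 else 0

-- structural versions of A's two loops over the sorted prefix
def cS (A : Int) (B : Int) : List (Int × Int) → Int
  | [] => 0
  | [_] => 0
  | p :: q :: rest => tieT A B p q + cS A B (q :: rest)

def pS (A : Int) (B : Int) (L : Int) : List (Int × Int) → Int
  | [] => 0
  | [p] => contrib p L B
  | p :: q :: rest => contrib p L (rightR B p q) + pS A B (max A (((p.1 + q.1) >>> (1 : Nat)) + 1)) (q :: rest)

theorem altGo_eq (A B : Int) (rest : List (Int × Int)) :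
    ∀ total px pd pleft, solveAltGo A B total px pd pleft rest
      = total + cS A B ((px, pd) :: rest) + pS A B pleft ((px, pd) :: rest) := by
  induction rest with
  | nil =>
    intro total px pd pleft
    simp only [solveAltGo, cS, pS, contrib]
    split_ifs <;> ring
  | cons hd tl ih =>
    intro total px pd pleft
    obtain ⟨x, d⟩ := hd
    simp only [solveAltGo, ih, cS, pS, tieT, rightR, contrib]
    split_ifs <;> simp_all <;> ring

theorem sum1_eq (A B : Int) (t : List (Int × Int)) :
    ((List.range (t.length - 1)).map
      (fun k => tieT A B (t.getD k (0, 0)) (t.getD (k + 1) (0, 0)))).sum = cS A B t := by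
  induction t with
  | nil => simp [cS]
  | cons p t ih =>
    match t with
    | [] => simp [cS]
    | q :: rest =>
      rw [show (p :: q :: rest).length - 1 = ((q :: rest).length - 1) + 1 by simp,
        List.range_succ_eq_map, List.map_cons, List.map_map, List.sum_cons]
      have h2 : ∀ k ∈ List.range ((q :: rest).length - 1),
          ((fun k => tieT A B ((p :: q :: rest).getD k (0, 0)) ((p :: q :: rest).getD (k + 1) (0, 0))) ∘ Nat.succ) k
            = (fun k => tieT A B ((q :: rest).getD k (0, 0)) ((q :: rest).getD (k + 1) (0, 0))) k := by
        intro k hk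
        simp [Function.comp, List.getD_cons_succ]
      rw [List.map_congr_left h2, ih]
      simp [cS]

theorem sum2_eq (A B : Int) (t : List (Int × Int)) :
    ∀ L, ((List.range t.length).map
      (fun k => contrib (t.getD k (0, 0))
        (if k = 0 then L else max A ((((t.getD (k - 1) (0, 0)).1 + (t.getD k (0, 0)).1) >>> (1 : Nat)) + 1))
        (if k + 1 < t.length then rightR B (t.getD k (0, 0)) (t.getD (k + 1) (0, 0)) else B))).sum
      = pS A B L t := by
  induction t with
  | nil => simp [pS]
  | cons p t ih =>
    intro L
    match t with
    | [] => simp [pS, contrib]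
    | q :: rest =>
      rw [show (p :: q :: rest).length = (q :: rest).length + 1 from rfl,
        List.range_succ_eq_map, List.map_cons, List.map_map, List.sum_cons]
      have h2 : ∀ k ∈ List.range (q :: rest).length,
          ((fun k => contrib ((p :: q :: rest).getD k (0, 0))
              (if k = 0 then L else max A (((((p :: q :: rest).getD (k - 1) (0, 0)).1 + ((p :: q :: rest).getD k (0, 0)).1) >>> (1 : Nat)) + 1))
              (if k + 1 < (q :: rest).length + 1 then rightR B ((p :: q :: rest).getD k (0, 0)) ((p :: q :: rest).getD (k + 1) (0, 0)) else B)) ∘ Nat.succ) k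
            = (fun k => contrib ((q :: rest).getD k (0, 0))
              (if k = 0 then max A (((p.1 + q.1) >>> (1 : Nat)) + 1) else max A (((((q :: rest).getD (k - 1) (0, 0)).1 + ((q :: rest).getD k (0, 0)).1) >>> (1 : Nat)) + 1))
              (if k + 1 < (q :: rest).length then rightR B ((q :: rest).getD k (0, 0)) ((q :: rest).getD (k + 1) (0, 0)) else B)) k := by
        intro k hk
        cases k with
        | zero => simp [Function.comp, List.getD_cons_succ]
        | succ m =>
          simp only [Function.comp_apply, List.getD_cons_succ, Nat.succ_eq_add_one,
            Nat.add_sub_cancel, List.length_cons]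
          have hif : (m + 1 + 1 + 1 < rest.length + 1 + 1) ↔ (m + 1 + 1 < rest.length + 1) := by omega
          have hz : ¬ (m + 1 + 1 = 0) := by omega
          have hz2 : ¬ (m + 1 = 0) := by omega
          simp [hif, hz, hz2, List.getD_cons_succ]
      rw [List.map_congr_left h2, ih]
      simp [pS]

-- ===== VERDICT (by name: the statement is the Claim_ definition above) =====
theorem getD_take_eq (s : List (Int × Int)) (n k : Nat) (hk : k < n) :
    (s.take n).getD k (0, 0) = s.getD k (0, 0) := by
  simp [List.getD, List.getElem?_take, hk]

theorem solve_spec : Claim_equal_solve := by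
  intro N A B data _ hpre
  unfold Spec_solve Pre_solve at *
  by_cases hN : N ≤ 0
  · -- both loops are empty; B's prefix is empty
    simp only [solve, solve_alt, PySem.List.pyRange_one_eq_nil (show N ≤ (1:Int) by omega),
      PySem.List.pyRange_one_eq_nil (show N ≤ (0:Int) by omega), List.foldl_nil,
      if_neg (show ¬ (0 < N) by omega)]
  · push_neg at hN
    simp only [solve, solve_alt, if_pos hN]
    set s := PySem.List.sorted2 data (fun p => p.1) (fun p => p.2) with hs
    have hlen : s.length = data.length :=
      (PySem.List.sorted2_perm data (fun p => p.1) (fun p => p.2) false).length_eq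
    set n := N.toNat with hnd
    have hNn : N = (n : Int) := by omega
    have hns : n ≤ s.length := by omega
    set t := s.take n with htd
    have ht : t.length = n := by simp [htd]; omega
    have hgd : ∀ k : Nat, k < n → PySem.List.pyGetD s ((k : Nat) : Int) (0, 0) = t.getD k (0, 0) := by
      intro k hk
      rw [PySem.List.pyGetD_natCast, getD_take_eq s n k hk]
    -- B side
    rw [PySem.List.slice_to s (show (0:Int) ≤ N by omega),
      show List.take N.toNat s = t from by rw [htd, hnd]]
    -- A side loop 1
    have h1 : (PySem.List.pyRange 1 N).foldl (fun result i =>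
        let prev := PySem.List.pyGetD s (i - 1) (0, 0)
        let cur := PySem.List.pyGetD s i (0, 0)
        let gap := cur.1 - prev.1
        if PySem.Int.band gap 1 = 0 then
          let mid := (cur.1 + prev.1) >>> (1 : Nat)
          if A ≤ mid ∧ mid ≤ B ∧ PySem.Int.bor prev.2 cur.2 ≠ 0 then result + 1 else result
        else result) 0
        = cS A B t := by
      rw [PySem.List.pyRange_one 1 N, List.foldl_map]
      rw [PySem.List.foldl_congr_mem _ _
        (fun (acc : Int) (k : Nat) => acc + tieT A B (t.getD k (0, 0)) (t.getD (k + 1) (0, 0))) 0 ?_]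
      · rw [PySem.List.foldl_add, zero_add,
          show (N - 1).toNat = t.length - 1 from by rw [ht]; omega, sum1_eq]
      · intro acc k hk
        simp only [List.mem_range] at hk
        have hk1 : k + 1 < n := by omega
        have e1 : (1 : Int) + (k : Int) - 1 = ((k : Nat) : Int) := by push_cast; ring
        have e2 : (1 : Int) + (k : Int) = (((k + 1) : Nat) : Int) := by push_cast; ring
        have e1' : (((k + 1) : Nat) : Int) - 1 = ((k : Nat) : Int) := by push_cast; ring
        simp only [e1, e2, e1', hgd k (by omega), hgd (k + 1) hk1]
        simp only [tieT, PySem.Int.band_one]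
        rw [show (t.getD (k+1) (0,0)).1 + (t.getD k (0,0)).1
            = (t.getD k (0,0)).1 + (t.getD (k+1) (0,0)).1 from by ring]
        split_ifs <;> first | rfl | omega | tauto
    rw [h1]
    -- A side loop 2
    rw [PySem.List.pyRange_zero N, List.foldl_map,
      show N.toNat = t.length from by rw [ht, hnd]]
    rw [PySem.List.foldl_congr_mem _ _
      (fun (acc : Int) (k : Nat) => acc + contrib (t.getD k (0, 0))
        (if k = 0 then A else max A ((((t.getD (k - 1) (0, 0)).1 + (t.getD k (0, 0)).1) >>> (1 : Nat)) + 1))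
        (if k + 1 < t.length then rightR B (t.getD k (0, 0)) (t.getD (k + 1) (0, 0)) else B)) (cS A B t) ?_]
    · rw [PySem.List.foldl_add, sum2_eq]
      -- B side: t is nonempty
      have htne : t ≠ [] := by intro h; rw [h] at ht; simp at ht; omega
      obtain ⟨⟨x, d⟩, rest, hrest⟩ := List.exists_cons_of_ne_nil htne
      rw [hrest]
      show cS A B ((x, d) :: rest) + pS A B A ((x, d) :: rest) = solveAltGo A B 0 x d A rest
      rw [altGo_eq]
      ring
    · intro acc k hk
      simp only [List.mem_range, ht] at hk
      have hkn : k < n := hk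
      have hkN : (k : Int) < N := by omega
      simp only [hgd k hkn]
      have hcond2 : ((k : Int) < N - 1) ↔ (k + 1 < t.length) := by rw [ht]; omega
      by_cases hk0 : k = 0
      · subst hk0
        simp only [if_neg (show ¬ ((0:Nat) : Int) > 0 by simp), if_pos rfl]
        by_cases hc : ((0:Nat) : Int) < N - 1
        · have h01 : (0 : Nat) + 1 < n := by omega
          have e3 : ((0:Nat) : Int) + 1 = (((0 + 1) : Nat) : Int) := by norm_num
          simp only [if_pos hc, if_pos (hcond2.mp hc), e3, hgd (0 + 1) h01]
          simp only [contrib, rightR, PySem.Int.band_one]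
          split_ifs <;> first | rfl | omega | tauto
        · simp only [if_neg hc, if_neg (fun h => hc (hcond2.mpr h))]
          simp only [contrib]
          split_ifs <;> first | rfl | omega | tauto
      · have hkpos : ((k : Nat) : Int) > 0 := by omega
        have e4 : ((k : Nat) : Int) - 1 = (((k - 1) : Nat) : Int) := by
          push_cast [Nat.cast_sub (by omega : 1 ≤ k)]; ring
        simp only [if_pos hkpos, if_neg hk0, e4, hgd (k - 1) (by omega)]
        by_cases hc : ((k : Nat) : Int) < N - 1
        · have hk1 : k + 1 < n := by omega
          have e5 : ((k : Nat) : Int) + 1 = (((k + 1) : Nat) : Int) := by push_cast; ring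
          simp only [if_pos hc, if_pos (hcond2.mp hc), e5, hgd (k + 1) hk1]
          simp only [contrib, rightR, PySem.Int.band_one]
          split_ifs <;> first | rfl | omega | tauto
        · simp only [if_neg hc, if_neg (fun h => hc (hcond2.mpr h))]
          simp only [contrib]
          split_ifs <;> first | rfl | omega | tauto
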